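-- pv_equiv track=rewrite | github.com/JuangarcDev/script_diferencias_vig_2024_2025 | diferencia_mpio_2024_2025.py | extraer_primeros_5
-- ===== SOURCE A (Python) =====
-- def extraer_primeros_5(predios):
--     conteo = {}
--     for predio in predios:
--         clave = predio[:5]  # Extraer los primeros 5 caracteres
--         if clave in conteo:
--             conteo[clave] += 1
--         else:
--             conteo[clave] = 1
--     return conteo
-- ===== SOURCE B (Python) =====
-- def extraer_primeros_5(predios):
--     # Alternative decomposition: map to prefixes, dedup in first-occurrence
--     # order, then count each distinct prefix with list.count (no running dict).
--     claves = [p[:5] for p in predios]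
--     unicas = list(dict.fromkeys(claves))
--     return {c: claves.count(c) for c in unicas}
-- ===== Notes on version B (the rewrite author's own statement) =====
-- stated objective: alternative
-- what changed: Replaces the incremental dict-counter loop by a three-stage pipeline: map every string to its 5-char prefix, dedup the prefixes in first-occurrence order, then count each distinct prefix with list.count.
import Mathlib
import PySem

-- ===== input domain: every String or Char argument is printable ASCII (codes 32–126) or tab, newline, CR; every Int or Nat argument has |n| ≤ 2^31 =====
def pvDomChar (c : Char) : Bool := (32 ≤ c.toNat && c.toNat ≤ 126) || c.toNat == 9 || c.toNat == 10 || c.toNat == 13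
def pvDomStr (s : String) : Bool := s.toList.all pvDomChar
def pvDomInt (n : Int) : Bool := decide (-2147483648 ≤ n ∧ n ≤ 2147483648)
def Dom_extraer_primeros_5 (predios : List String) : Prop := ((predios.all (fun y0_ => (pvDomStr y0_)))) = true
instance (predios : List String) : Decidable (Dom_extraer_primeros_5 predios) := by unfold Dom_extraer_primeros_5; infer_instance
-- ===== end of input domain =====

-- B replaces the incremental dict-counter loop by map-to-prefix / ordered-dedup / count-per-key; objective: alternative.


-- ===== PORT A =====
-- for predio in predios: clave = predio[:5]; if clave in conteo: conteo[clave] += 1 else: conteo[clave] = 1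
def extraer_primeros_5 (predios : List String) : List (String × Int) :=
  (predios.foldl (fun conteo predio =>
      let clave := PySem.Str.slice predio none (some 5)
      if conteo.contains clave then
        conteo.insert clave (conteo.getD clave 0 + 1)   -- conteo[clave] += 1 (key present)
      else
        conteo.insert clave 1)
    (PySem.Dict.empty : PySem.Dict String Int)).items

-- ===== PORT B =====
def extraer_primeros_5_alt (predios : List String) : List (String × Int) :=
  let claves := predios.map (fun p => PySem.Str.slice p none (some 5))
  let unicas := PySem.List.dedup claves               -- list(dict.fromkeys(claves))
  unicas.map (fun c => (c, (claves.count c : Int)))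

-- ===== PRECONDITION & SPEC =====
def Spec_extraer_primeros_5 (predios : List String) (out : List (String × Int)) : Prop := out = extraer_primeros_5_alt predios
instance (predios : List String) (out : List (String × Int)) : Decidable (Spec_extraer_primeros_5 predios out) := by unfold Spec_extraer_primeros_5; infer_instance

-- ===== CLAIM (what is proved, stated in full; the proofs are below) =====
def Claim_equal_extraer_primeros_5 : Prop := ∀ (predios : List String), Dom_extraer_primeros_5 predios → Spec_extraer_primeros_5 predios (extraer_primeros_5 predios)

-- ===== LEMMAS AND PROOFS =====

-- A's loop body is exactly the Counter update d.modify clave 0 (· + 1).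
lemma step_eq_modify (d : PySem.Dict String Int) (clave : String) :
    (if d.contains clave then d.insert clave (d.getD clave 0 + 1) else d.insert clave 1)
      = d.modify clave 0 (· + 1) := by
  by_cases h : d.contains clave = true
  · simp [h, PySem.Dict.modify]
  · simp only [Bool.not_eq_true] at h
    simp [h, PySem.Dict.modify, PySem.Dict.getD_of_not_contains d 0 h]

-- ===== VERDICT (by name: the statement is the Claim_ definition above) =====
theorem extraer_primeros_5_spec : Claim_equal_extraer_primeros_5 := by
  intro predios _
  unfold Spec_extraer_primeros_5 extraer_primeros_5 extraer_primeros_5_alt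
  rw [show (fun (conteo : PySem.Dict String Int) (predio : String) =>
        let clave := PySem.Str.slice predio none (some 5)
        if conteo.contains clave then conteo.insert clave (conteo.getD clave 0 + 1)
        else conteo.insert clave 1)
      = (fun conteo predio =>
        (fun d c => d.modify c 0 (· + 1)) conteo (PySem.Str.slice predio none (some 5)))
      from funext fun d => funext fun p => step_eq_modify d _]
  rw [← List.foldl_map (f := fun p => PySem.Str.slice p none (some 5))
        (g := fun (d : PySem.Dict String Int) c => d.modify c 0 (· + 1))]
  rw [← PySem.Dict.counter_eq_foldl, PySem.Dict.items_counter]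
  simp [PySem.List.dedup_eq_ofList]
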